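-- pv_equiv track=rewrite | github.com/Venhoff-cpu/BookBase | books/api_procesor.py | isbn_check
-- ===== SOURCE A (Python) =====
-- def isbn_check(isbn_list):
--     result = ''
--     for isbn in isbn_list:
--         if 'ISBN_13' in isbn.values():
--             result = isbn['identifier']
--             return result
--         elif 'ISBN_10' in isbn.values():
--             result = isbn['identifier']
--         elif not result:
--             result = 'Inny rodzaj identyfikatora'
--
--     return result
-- ===== SOURCE B (Python) =====
-- _MISSING = object()
--
-- def isbn_check(isbn_list):
--     isbn13 = next((i['identifier'] for i in isbn_list if 'ISBN_13' in i.values()), _MISSING)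
--     if isbn13 is not _MISSING:
--         return isbn13
--     result = ''
--     for i in isbn_list:
--         if 'ISBN_10' in i.values():
--             result = i['identifier']
--         elif not result:
--             result = 'Inny rodzaj identyfikatora'
--     return result
-- ===== Notes on version B (the rewrite author's own statement) =====
-- stated objective: idiomatic
-- what changed: Replaces A's single interleaved early-return loop by a find-then-fold decomposition: a next(...) pass that returns the first ISBN_13 identifier, and only otherwise a separate fold over the whole list computing the ISBN_10/fallback result.
import Mathlib
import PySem

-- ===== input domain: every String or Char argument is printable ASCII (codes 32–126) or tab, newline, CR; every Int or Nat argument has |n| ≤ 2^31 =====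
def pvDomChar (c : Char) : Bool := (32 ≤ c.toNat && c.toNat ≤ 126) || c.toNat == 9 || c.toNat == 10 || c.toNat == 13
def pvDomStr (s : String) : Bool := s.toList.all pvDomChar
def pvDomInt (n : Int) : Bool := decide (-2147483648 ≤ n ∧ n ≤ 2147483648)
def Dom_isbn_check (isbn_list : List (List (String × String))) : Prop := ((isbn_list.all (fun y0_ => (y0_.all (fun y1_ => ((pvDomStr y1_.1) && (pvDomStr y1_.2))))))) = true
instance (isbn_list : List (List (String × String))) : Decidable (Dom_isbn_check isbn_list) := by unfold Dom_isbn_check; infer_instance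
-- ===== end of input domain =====

-- B replaces A's interleaved early-return loop by an idiomatic find-then-fold decomposition; same O(n) cost.


-- shared readings of a dict argument (each inner list is a Python dict, read through PySem.Dict):
-- isbn.values()
def pvVals (d : List (String × String)) : List String := (PySem.Dict.ofList d).values
-- isbn['identifier'] ; Pre_ guarantees the key is present wherever either Python reads it (KeyError excluded)
def pvIdent (d : List (String × String)) : String := ((PySem.Dict.ofList d).get? "identifier").getD ""

-- ===== PORT A =====
def isbnLoopA : List (List (String × String)) → String → String
  | [], r => r
  | d :: t, r =>
    if (pvVals d).contains "ISBN_13" then pvIdent d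
    else if (pvVals d).contains "ISBN_10" then isbnLoopA t (pvIdent d)
    else if r = "" then isbnLoopA t "Inny rodzaj identyfikatora"
    else isbnLoopA t r

def isbn_check (isbn_list : List (List (String × String))) : String :=
  isbnLoopA isbn_list ""

-- ===== PORT B =====
def isbn_check_alt (isbn_list : List (List (String × String))) : String :=
  match isbn_list.find? (fun d => (pvVals d).contains "ISBN_13") with
  | some d => pvIdent d
  | none =>
    isbn_list.foldl
      (fun r d =>
        if (pvVals d).contains "ISBN_10" then pvIdent d
        else if r = "" then "Inny rodzaj identyfikatora" else r) ""

-- ===== PRECONDITION & SPEC =====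
-- Pre_ excludes exactly the inputs on which Python A raises KeyError: a dict holding value
-- 'ISBN_13' or 'ISBN_10' but lacking key 'identifier', unless it is preceded by an ISBN_13 dict
-- (then A returns before scanning it).
def Pre_isbn_check (isbn_list : List (List (String × String))) : Prop :=
  ∀ i < isbn_list.length,
    (("ISBN_13" ∈ pvVals (isbn_list.getD i []) ∨ "ISBN_10" ∈ pvVals (isbn_list.getD i [])) ∧
      "identifier" ∉ (PySem.Dict.ofList (isbn_list.getD i [])).keys) →
    ∃ j < i, "ISBN_13" ∈ pvVals (isbn_list.getD j [])

instance (isbn_list : List (List (String × String))) : Decidable (Pre_isbn_check isbn_list) := by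
  unfold Pre_isbn_check; infer_instance

def pvWitness_isbn_check : (List (List (String × String))) :=
  [[("type", "ISBN_13"), ("identifier", "X")], [("type", "ISBN_10"), ("identifier", "Y")]]

def Spec_isbn_check (isbn_list : List (List (String × String))) (out : String) : Prop := out = isbn_check_alt isbn_list
instance (isbn_list : List (List (String × String))) (out : String) : Decidable (Spec_isbn_check isbn_list out) := by unfold Spec_isbn_check; infer_instance

-- ===== CLAIM (what is proved, stated in full; the proofs are below) =====
def Claim_equal_isbn_check : Prop := ∀ (isbn_list : List (List (String × String))), Dom_isbn_check isbn_list → Pre_isbn_check isbn_list → Spec_isbn_check isbn_list (isbn_check isbn_list)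

-- ===== LEMMAS AND PROOFS =====
-- A's loop, for any accumulator, equals B's find-then-fold started from that accumulator.
theorem isbnLoopA_eq_find_fold (l : List (List (String × String))) (r : String) :
    isbnLoopA l r =
      match l.find? (fun d => (pvVals d).contains "ISBN_13") with
      | some d => pvIdent d
      | none =>
        l.foldl
          (fun r d =>
            if (pvVals d).contains "ISBN_10" then pvIdent d
            else if r = "" then "Inny rodzaj identyfikatora" else r) r := by
  induction l generalizing r with
  | nil => rfl
  | cons d t ih =>
    by_cases h13 : "ISBN_13" ∈ pvVals d
    · simp [isbnLoopA, List.find?, h13]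
    · by_cases h10 : "ISBN_10" ∈ pvVals d
      · simp [isbnLoopA, List.find?, h13, h10, ih]
      · by_cases hr : r = ""
        · simp [isbnLoopA, List.find?, h13, h10, hr, ih]
        · simp [isbnLoopA, List.find?, h13, h10, hr, ih]

-- ===== VERDICT (by name: the statement is the Claim_ definition above) =====
theorem isbn_check_spec : Claim_equal_isbn_check := by
  intro l _ _
  unfold Spec_isbn_check isbn_check isbn_check_alt
  exact isbnLoopA_eq_find_fold l ""
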